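-- pv_equiv track=rewrite | github.com/HadjSassi/geekshack3 | scode/YaRM/prob7/main.py | finddeb
-- ===== SOURCE A (Python) =====
-- deb=["(","\'","\"","{","["]
--
-- def finddeb(ch):
--     try:
--         for x in ch:
--             if x in deb:
--                 return ch.index(x)
--         return -1
--     except:
--         return -2
-- ===== SOURCE B (Python) =====
-- deb=["(","\'","\"","{","["]
--
-- def finddeb(ch):
--     try:
--         return min((ch.index(d) for d in deb if d in ch), default=-1)
--     except:
--         return -2
-- ===== Notes on version B (the rewrite author's own statement) =====
-- stated objective: faster
-- what changed: Replaces A's Python-level left-to-right char scan with the minimum over the five delimiters of their first-occurrence index (membership-guarded, default -1), each found by a C-level substring scan.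
import Mathlib
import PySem

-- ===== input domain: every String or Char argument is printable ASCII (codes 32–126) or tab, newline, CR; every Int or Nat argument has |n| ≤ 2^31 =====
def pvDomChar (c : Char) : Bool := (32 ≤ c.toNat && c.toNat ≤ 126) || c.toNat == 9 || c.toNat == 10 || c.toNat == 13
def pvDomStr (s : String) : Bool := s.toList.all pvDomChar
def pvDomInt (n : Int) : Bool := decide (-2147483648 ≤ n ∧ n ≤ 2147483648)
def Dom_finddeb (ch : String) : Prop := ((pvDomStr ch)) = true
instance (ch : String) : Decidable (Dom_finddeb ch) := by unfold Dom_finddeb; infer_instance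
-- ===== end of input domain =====

-- B replaces A's Python-level char-by-char scan by the minimum over the five delimiters of their
-- first-occurrence index (each found by a C-level `in`/`.index` scan); measurably faster by constant factor.

-- ===== PORT A =====
-- the module constant `deb` (shared context of both versions)
def pvDeb : List Char := ['(', '\'', '"', '{', '[']

-- `for x in ch: if x in deb: return ch.index(x)` / `return -1`; the `except` arm (-2) is the
-- ValueError branch of ch.index, unreachable for strings since x was drawn from ch.
def finddebScan (full : List Char) : List Char → Int
  | [] => -1
  | x :: rest =>
      if x ∈ pvDeb then
        match PySem.List.index? full x with
        | some i => (i : Int)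
        | none => -2
      else finddebScan full rest

def finddeb (ch : String) : Int := finddebScan ch.toList ch.toList

-- ===== PORT B =====
-- min((ch.index(d) for d in deb if d in ch), default=-1)
def finddeb_alt (ch : String) : Int :=
  let idxs : List Nat :=
    pvDeb.filterMap (fun d => if d ∈ ch.toList then PySem.List.index? ch.toList d else none)
  match PySem.List.min? idxs (fun i => i) with
  | some m => (m : Int)
  | none => -1

-- ===== PRECONDITION & SPEC =====
def Spec_finddeb (ch : String) (out : Int) : Prop := out = finddeb_alt ch
instance (ch : String) (out : Int) : Decidable (Spec_finddeb ch out) := by unfold Spec_finddeb; infer_instance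

-- ===== CLAIM (what is proved, stated in full; the proofs are below) =====
def Claim_equal_finddeb : Prop := ∀ (ch : String), Dom_finddeb ch → Spec_finddeb ch (finddeb ch)

-- ===== LEMMAS AND PROOFS =====

-- A's scan returns: first char of suf in pvDeb, then its index in full (or -1 when none).
theorem finddebScan_eq_find? (full suf : List Char) :
    finddebScan full suf =
      match suf.find? (· ∈ pvDeb) with
      | some x => (match PySem.List.index? full x with
                   | some i => (i : Int)
                   | none => -2)
      | none => -1 := by
  induction suf with
  | nil => simp [finddebScan]
  | cons x rest ih =>
      by_cases hx : x ∈ pvDeb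
      · simp [finddebScan, hx, List.find?]
      · simp [finddebScan, hx, List.find?, ih]

theorem finddeb_eq_alt (ch : String) : finddeb ch = finddeb_alt ch := by
  unfold finddeb finddeb_alt
  rw [finddebScan_eq_find?]
  cases hfind : ch.toList.find? (· ∈ pvDeb) with
  | none =>
      -- no delimiter occurs in ch: every guarded index? is none, so idxs = [] and min? = none
      have hall : ∀ c ∈ ch.toList, c ∉ pvDeb := by
        intro c hc hmem
        have := List.find?_eq_none.mp hfind c hc
        simp [hmem] at this
      have hidxs : pvDeb.filterMap
          (fun d => if d ∈ ch.toList then PySem.List.index? ch.toList d else none) = [] := by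
        apply List.filterMap_eq_nil_iff.mpr
        intro d hd
        by_cases hdl : d ∈ ch.toList
        · exact absurd hd (hall d hdl)
        · simp [hdl]
      rw [hidxs]
      simp [PySem.List.min?]
  | some x =>
      obtain ⟨hxdeb, pre, suf, hsplit, hpre⟩ := List.find?_eq_some_iff_append.mp hfind
      have hxdeb' : x ∈ pvDeb := by simpa using hxdeb
      have hpre' : ∀ c ∈ pre, c ∉ pvDeb := by
        intro c hc hmem
        have := hpre c hc
        simp [hmem] at this
      have hxpre : x ∉ pre := fun h => hpre' x h hxdeb'
      have hidx : PySem.List.index? ch.toList x = some pre.length :=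
        (PySem.List.index?_eq_some_iff ch.toList x pre.length).mpr
          ⟨pre, suf, hsplit, rfl, hxpre⟩
      have hxl : x ∈ ch.toList := by rw [hsplit]; simp
      have hjmem : pre.length ∈ pvDeb.filterMap
          (fun d => if d ∈ ch.toList then PySem.List.index? ch.toList d else none) :=
        List.mem_filterMap.mpr ⟨x, hxdeb', by simpa [hxl] using hidx⟩
      -- every member of idxs is ≥ pre.length (a delimiter cannot occur inside pre)
      have hge : ∀ k ∈ pvDeb.filterMap
          (fun d => if d ∈ ch.toList then PySem.List.index? ch.toList d else none),
          pre.length ≤ k := by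
        intro k hk
        obtain ⟨d, hd, hdk⟩ := List.mem_filterMap.mp hk
        by_cases hdl : d ∈ ch.toList
        · simp only [hdl, if_pos] at hdk
          obtain ⟨hklt, hlk, -⟩ := PySem.List.getElem_of_index?_eq_some hdk
          by_contra hcon
          have hlt : k < pre.length := Nat.lt_of_not_le hcon
          have hk2 : k < (pre ++ x :: suf).length := by
            simp only [← hsplit]; exact hklt
          have h1 : ch.toList[k]'hklt = (pre ++ x :: suf)[k]'hk2 :=
            List.getElem_of_eq hsplit hklt
          have h2 : (pre ++ x :: suf)[k]'hk2 = pre[k]'hlt :=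
            List.getElem_append_left ..
          have hdpre : d ∈ pre := by
            rw [← hlk, h1, h2]; exact List.getElem_mem _
          exact hpre' d hdpre hd
        · simp [hdl] at hdk
      cases hmin : PySem.List.min?
          (pvDeb.filterMap
            (fun d => if d ∈ ch.toList then PySem.List.index? ch.toList d else none))
          (fun i => i) with
      | none =>
          have := (PySem.List.min?_eq_none_iff _ _).mp hmin
          rw [this] at hjmem
          simp at hjmem
      | some m =>
          have hmmem := PySem.List.min?_mem hmin
          have hmle : m ≤ pre.length := PySem.List.min?_isMin hmin pre.length hjmem
          have hmge : pre.length ≤ m := hge m hmmem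
          have hm : m = pre.length := le_antisymm hmle hmge
          simp only [PySem.List.index?_eq_idxOf?] at hidx hmin
          simp [hidx, hmin, hm]

-- ===== VERDICT (by name: the statement is the Claim_ definition above) =====
theorem finddeb_spec : Claim_equal_finddeb := by
  intro ch _
  unfold Spec_finddeb
  exact finddeb_eq_alt ch
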